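-- pv_equiv track=rewrite | github.com/lilyang1989/semantic- | main.py | process
-- ===== SOURCE A (Python) =====
-- def process(raw: list) -> dict:
--     data = {}
--     for i in raw:
--         keys = data.keys()
--         if i[0] in keys:
--             count = data[i[0]][i[1]] + 1
--             data[i[0]][i[1]] = count
--         else:
--             data[i[0]] = {"01": 0, "02": 0, "03": 0, "04": 0, "05": 0, "06": 0, "07": 0, "08": 0, "09": 0, "10": 0,
--                           "11": 0, "12": 0}
--             count = data[i[0]][i[1]] + 1
--             data[i[0]][i[1]] = count
--     return data
-- ===== SOURCE B (Python) =====
-- MONTHS = ["01", "02", "03", "04", "05", "06", "07", "08", "09", "10", "11", "12"]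
--
--
-- def process(raw: list) -> dict:
--     keys = list(dict.fromkeys(i[0] for i in raw))
--     return {k: {m: sum(1 for i in raw if i[0] == k and i[1] == m) for m in MONTHS}
--             for k in keys}
-- ===== Notes on version B (the rewrite author's own statement) =====
-- stated objective: simpler
-- what changed: Replaces A's single interleaved pass that mutates per-key month dicts in place by a closed counting form: dedup the first components once, then compute each month entry directly as the number of matching rows.
import Mathlib
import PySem

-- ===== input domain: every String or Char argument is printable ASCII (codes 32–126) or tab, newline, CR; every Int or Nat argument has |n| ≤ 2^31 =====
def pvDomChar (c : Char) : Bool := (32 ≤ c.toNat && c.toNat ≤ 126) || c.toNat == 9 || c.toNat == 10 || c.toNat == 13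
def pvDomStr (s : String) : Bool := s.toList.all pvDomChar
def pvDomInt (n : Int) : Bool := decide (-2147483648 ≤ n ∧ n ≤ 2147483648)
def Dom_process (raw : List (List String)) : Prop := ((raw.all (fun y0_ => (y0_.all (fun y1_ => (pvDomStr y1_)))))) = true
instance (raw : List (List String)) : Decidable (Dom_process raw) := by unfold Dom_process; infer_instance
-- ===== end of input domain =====

-- B is simpler: dedup the first components once, then each month count is computed
-- directly as the number of matching rows, instead of A's in-place per-key mutation.

-- ===== PORT A =====
-- A's literal fresh month template
def pvTemplateA : PySem.Dict String Int :=
  PySem.Dict.ofList [("01", 0), ("02", 0), ("03", 0), ("04", 0), ("05", 0), ("06", 0),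
                     ("07", 0), ("08", 0), ("09", 0), ("10", 0), ("11", 0), ("12", 0)]

-- one iteration of A's loop; i[0]/i[1] via pyGetD and data[k] via getD are exact under
-- Pre_process (rows have ≥ 2 elements, i[1] is a template key, and the keys looked up are present)
def processStep (data : PySem.Dict String (PySem.Dict String Int)) (i : List String) :
    PySem.Dict String (PySem.Dict String Int) :=
  let i0 := PySem.List.pyGetD i 0 ""
  let i1 := PySem.List.pyGetD i 1 ""
  if data.contains i0 then
    let inner := data.getD i0 PySem.Dict.empty
    let count := inner.getD i1 0 + 1
    data.insert i0 (inner.insert i1 count)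
  else
    let data1 := data.insert i0 pvTemplateA
    let inner := data1.getD i0 PySem.Dict.empty
    let count := inner.getD i1 0 + 1
    data1.insert i0 (inner.insert i1 count)

def process (raw : List (List String)) : List (String × List (String × Int)) :=
  ((raw.foldl processStep PySem.Dict.empty).items.map (fun p => (p.1, p.2.items)))

-- ===== PORT B =====
def pvMONTHS : List String :=
  ["01", "02", "03", "04", "05", "06", "07", "08", "09", "10", "11", "12"]

def process_alt (raw : List (List String)) : List (String × List (String × Int)) :=
  let keys := PySem.List.dedup (raw.map (fun i => PySem.List.pyGetD i 0 ""))
  keys.map (fun k =>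
    (k, pvMONTHS.map (fun m =>
      (m, ((raw.filter (fun i =>
             PySem.List.pyGetD i 0 "" == k && PySem.List.pyGetD i 1 "" == m)).length : Int)))))

-- ===== PRECONDITION & SPEC =====
-- Pre_ excludes exactly the inputs on which A raises: a row shorter than 2 elements
-- (IndexError on i[0]/i[1]) or whose second element is not one of the 12 template keys
-- (KeyError on data[i[0]][i[1]]).
def Pre_process (raw : List (List String)) : Prop :=
  ∀ i ∈ raw, 2 ≤ i.length ∧ PySem.List.pyGetD i 1 "" ∈ pvMONTHS
instance (raw : List (List String)) : Decidable (Pre_process raw) := by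
  unfold Pre_process; infer_instance

def pvWitness_process : List (List String) :=
  [["a", "03"], ["b", "03"], ["a", "03"], ["a", "11"]]

def Spec_process (raw : List (List String)) (out : List (String × List (String × Int))) : Prop := out = process_alt raw
instance (raw : List (List String)) (out : List (String × List (String × Int))) : Decidable (Spec_process raw out) := by unfold Spec_process; infer_instance

-- ===== CLAIM (what is proved, stated in full; the proofs are below) =====
def Claim_equal_process : Prop := ∀ (raw : List (List String)), Dom_process raw → Pre_process raw → Spec_process raw (process raw)

-- ===== LEMMAS AND PROOFS =====

-- count of rows with first component k and second component m
def pvCnt (l : List (List String)) (k m : String) : Int :=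
  ((l.filter (fun i =>
      PySem.List.pyGetD i 0 "" == k && PySem.List.pyGetD i 1 "" == m)).length : Int)

def pvAbs (l : List (List String)) : PySem.Dict String (PySem.Dict String Int) :=
  PySem.Dict.mk ((PySem.List.dedup (l.map (fun i => PySem.List.pyGetD i 0 ""))).map (fun k =>
    (k, PySem.Dict.mk (pvMONTHS.map (fun m => (m, pvCnt l k m))))))

theorem pv_nodup_months : pvMONTHS.Nodup := by decide

theorem pv_month_keys (c : String → Int) :
    (PySem.Dict.mk (pvMONTHS.map (fun m => (m, c m)))).keys = pvMONTHS := by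
  simp [PySem.Dict.keys, Function.comp_def]

theorem pv_month_getD (c : String → Int) (v : String) (hv : v ∈ pvMONTHS) :
    (PySem.Dict.mk (pvMONTHS.map (fun m => (m, c m)))).getD v 0 = c v := by
  have hm : (v, c v) ∈ (PySem.Dict.mk (pvMONTHS.map (fun m => (m, c m)))).items :=
    List.mem_map_of_mem hv
  have hn : (PySem.Dict.mk (pvMONTHS.map (fun m => (m, c m)))).keys.Nodup := by
    rw [pv_month_keys]; exact pv_nodup_months
  exact PySem.Dict.getD_of_mem_items _ hm hn 0

theorem pv_month_contains (c : String → Int) (v : String) (hv : v ∈ pvMONTHS) :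
    (PySem.Dict.mk (pvMONTHS.map (fun m => (m, c m)))).contains v = true := by
  rw [PySem.Dict.contains_eq_decide_mem_keys, pv_month_keys]; simpa using hv

theorem pv_inner_insert (c : String → Int) (v : String) (w : Int) (hv : v ∈ pvMONTHS) :
    (PySem.Dict.mk (pvMONTHS.map (fun m => (m, c m)))).insert v w
      = PySem.Dict.mk (pvMONTHS.map (fun m => (m, if m = v then w else c m))) := by
  apply PySem.Dict.ext
  rw [PySem.Dict.items_insert_of_contains _ _ (pv_month_contains c v hv)]
  simp only [List.map_map]
  apply List.map_congr_left
  intro m _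
  by_cases h : m = v <;> simp [h]

theorem pv_template_eq :
    pvTemplateA = PySem.Dict.mk (pvMONTHS.map (fun m => (m, (0 : Int)))) := by decide

theorem pv_cnt_append (l : List (List String)) (x : List String) (k m : String) :
    pvCnt (l ++ [x]) k m = pvCnt l k m
      + (if PySem.List.pyGetD x 0 "" = k ∧ PySem.List.pyGetD x 1 "" = m then 1 else 0) := by
  simp only [pvCnt, List.filter_append, List.length_append]
  by_cases h1 : PySem.List.pyGetD x 0 "" = k <;>
    by_cases h2 : PySem.List.pyGetD x 1 "" = m <;> simp [h1, h2]

theorem pv_cnt_nil_of_not_mem (l : List (List String)) (k m : String)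
    (hk : k ∉ l.map (fun i => PySem.List.pyGetD i 0 "")) : pvCnt l k m = 0 := by
  have h : l.filter (fun i =>
      PySem.List.pyGetD i 0 "" == k && PySem.List.pyGetD i 1 "" == m) = [] := by
    rw [List.filter_eq_nil_iff]
    intro i hi
    simp only [Bool.and_eq_true, beq_iff_eq, not_and]
    intro h0 _
    exact hk (by rw [← h0]; exact List.mem_map_of_mem hi)
  simp [pvCnt, h]

theorem pv_keys_pvAbs (l : List (List String)) :
    (pvAbs l).keys = PySem.List.dedup (l.map (fun i => PySem.List.pyGetD i 0 "")) := by
  simp [pvAbs, PySem.Dict.keys, Function.comp_def]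

theorem pv_contains_pvAbs (l : List (List String)) (k : String) :
    (pvAbs l).contains k
      = decide (k ∈ PySem.List.dedup (l.map (fun i => PySem.List.pyGetD i 0 ""))) := by
  rw [PySem.Dict.contains_eq_decide_mem_keys, pv_keys_pvAbs]

theorem pv_getD_pvAbs (l : List (List String)) (k : String)
    (hk : k ∈ PySem.List.dedup (l.map (fun i => PySem.List.pyGetD i 0 ""))) :
    (pvAbs l).getD k PySem.Dict.empty
      = PySem.Dict.mk (pvMONTHS.map (fun m => (m, pvCnt l k m))) := by
  have hm : (k, PySem.Dict.mk (pvMONTHS.map (fun m => (m, pvCnt l k m)))) ∈ (pvAbs l).items :=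
    List.mem_map_of_mem hk
  have hn : (pvAbs l).keys.Nodup := by
    rw [pv_keys_pvAbs]; exact PySem.List.nodup_dedup _
  exact PySem.Dict.getD_of_mem_items _ hm hn _

theorem pv_dedup_append (xs : List String) (x : String) :
    PySem.List.dedup (xs ++ [x])
      = if x ∈ xs then PySem.List.dedup xs else PySem.List.dedup xs ++ [x] := by
  rw [PySem.List.dedup_eq_ofList, PySem.List.dedup_eq_ofList, PySem.Set.ofList_append,
    PySem.Set.update_cons, PySem.Set.update_nil]
  by_cases h : x ∈ xs
  · simp [PySem.Set.add, PySem.Set.contains, (PySem.Set.mem_ofList xs x).mpr h, h]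
  · simp [PySem.Set.add, PySem.Set.contains, PySem.Set.mem_ofList, h]

theorem pv_mk_month_congr (c d : String → Int) (h : ∀ m ∈ pvMONTHS, c m = d m) :
    PySem.Dict.mk (pvMONTHS.map (fun m => (m, c m)))
      = PySem.Dict.mk (pvMONTHS.map (fun m => (m, d m))) := by
  apply PySem.Dict.ext
  dsimp only
  exact List.map_congr_left (fun m hm => by rw [h m hm])

theorem pv_inv (l : List (List String))
    (hp : ∀ i ∈ l, PySem.List.pyGetD i 1 "" ∈ pvMONTHS) :
    l.foldl processStep PySem.Dict.empty = pvAbs l := by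
  induction l using List.reverseRecOn with
  | nil => rfl
  | append_singleton l x ih =>
    have hpl : ∀ i ∈ l, PySem.List.pyGetD i 1 "" ∈ pvMONTHS := fun i hi => hp i (by simp [hi])
    have hv' : PySem.List.pyGetD x 1 "" ∈ pvMONTHS := hp x (by simp)
    rw [List.foldl_append, List.foldl_cons, List.foldl_nil, ih hpl]
    simp only [processStep]
    obtain ⟨k, hkdef⟩ : ∃ y, PySem.List.pyGetD x 0 "" = y := ⟨_, rfl⟩
    obtain ⟨v, hvdef⟩ : ∃ y, PySem.List.pyGetD x 1 "" = y := ⟨_, rfl⟩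
    rw [hvdef] at hv'
    rw [hkdef, hvdef]
    by_cases hk : k ∈ l.map (fun i => PySem.List.pyGetD i 0 "")
    · -- key already present
      have hkD : k ∈ PySem.List.dedup (l.map (fun i => PySem.List.pyGetD i 0 "")) := by
        rw [PySem.List.mem_dedup]; exact hk
      have hc : (pvAbs l).contains k = true := by
        rw [pv_contains_pvAbs]; simpa using hkD
      rw [if_pos hc]
      rw [pv_getD_pvAbs l k hkD, pv_month_getD _ v hv', pv_inner_insert _ v _ hv']
      apply PySem.Dict.ext
      rw [PySem.Dict.items_insert_of_contains _ _ hc]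
      simp only [pvAbs, List.map_map, List.map_append, List.map_cons,
        List.map_nil, pv_dedup_append, hkdef, hk, if_true]
      apply List.map_congr_left
      intro k' hk'
      by_cases h : k' = k
      · subst h
        simp only [Function.comp_def, beq_self_eq_true, if_true]
        congr 1
        apply pv_mk_month_congr
        intro m _
        rw [pv_cnt_append, hkdef, hvdef]
        by_cases hm : m = v
        · simp [hm]
        · simp [hm, Ne.symm hm]
      · have hbe : (k' == k) = false := by simp [h]
        simp only [Function.comp_def, hbe, if_false, Bool.false_eq_true]
        congr 1
        apply pv_mk_month_congr
        intro m _
        rw [pv_cnt_append, hkdef, hvdef]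
        simp [Ne.symm h]
    · -- new key
      have hkD : k ∉ PySem.List.dedup (l.map (fun i => PySem.List.pyGetD i 0 "")) := by
        rw [PySem.List.mem_dedup]; exact hk
      have hc : (pvAbs l).contains k = false := by
        rw [pv_contains_pvAbs]; simpa using hkD
      rw [if_neg (by simp [hc])]
      rw [pv_template_eq, PySem.Dict.getD_insert_self, pv_month_getD _ v hv',
        PySem.Dict.insert_insert_self, pv_inner_insert _ v _ hv']
      apply PySem.Dict.ext
      rw [PySem.Dict.items_insert_of_not_contains _ _ hc]
      simp only [pvAbs, List.map_append, List.map_cons, List.map_nil, pv_dedup_append,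
        hkdef, hk, if_false]
      congr 1
      · apply List.map_congr_left
        intro k' hk'
        have hne : k' ≠ k := fun h => hk (h ▸ (PySem.List.mem_dedup _ _).mp hk')
        congr 1
        apply pv_mk_month_congr
        intro m _
        rw [pv_cnt_append, hkdef, hvdef]
        simp [Ne.symm hne]
      · congr 2
        apply pv_mk_month_congr
        intro m _
        rw [pv_cnt_append, pv_cnt_nil_of_not_mem l k m hk, hkdef, hvdef]
        by_cases hm : m = v
        · simp [hm]
        · simp [hm, Ne.symm hm]

-- ===== VERDICT (by name: the statement is the Claim_ definition above) =====
theorem process_spec : Claim_equal_process := by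
  intro raw _ hpre
  unfold Spec_process process process_alt
  rw [pv_inv raw (fun i hi => (hpre i hi).2)]
  simp [pvAbs, List.map_map, Function.comp_def, pvCnt]
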